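-- pv_equiv track=rewrite | github.com/pranavik24/CodeSwitch | src/codeswitch_pipeline/generation.py | _ordered_candidate_indices
-- ===== SOURCE A (Python) =====
-- def _ordered_candidate_indices(
--     tokens: list[str],
--     candidate_indices: list[int],
--     switch_type: str,
--     target_replacements: int,
-- ) -> list[int]:
--     if switch_type != "inter-sentential":
--         return candidate_indices
--
--     sentence_groups = _sentence_candidate_groups(tokens, candidate_indices)
--     if len(sentence_groups) >= 2:
--         ranked_groups = sorted(
--             sentence_groups,
--             key=lambda group: abs(len(group) - target_replacements),
--         )
--         ordered: list[int] = []
--         for index in ranked_groups[0]: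
--             ordered.append(index)
--         for group in sentence_groups:
--             if group is ranked_groups[0]:
--                 continue
--             for index in group:
--                 ordered.append(index)
--         return ordered
--     return candidate_indices
--
-- def _sentence_candidate_groups(tokens: list[str], candidate_indices: list[int]) -> list[list[int]]:
--     groups: list[list[int]] = []
--     current: list[int] = []
--     candidate_set = set(candidate_indices)
--     for index, token in enumerate(tokens):
--         if index in candidate_set:
--             current.append(index)
--         if token in {".", "!", "?"}:
--             if current:
--                 groups.append(current)
--                 current = []
--     if current:
--         groups.append(current)
--     return groups
-- ===== SOURCE B (Python) =====
-- def _ordered_candidate_indices(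
--     tokens: list[str],
--     candidate_indices: list[int],
--     switch_type: str,
--     target_replacements: int,
-- ) -> list[int]:
--     if switch_type != "inter-sentential":
--         return candidate_indices
--
--     # Label each candidate with its sentence id = number of sentence-ending
--     # tokens strictly before it; no per-sentence index lists are ever built.
--     cands = sorted({i for i in candidate_indices if 0 <= i < len(tokens)})
--     sids = [sum(1 for t in tokens[:i] if t in (".", "!", "?")) for i in cands]
--
--     # Run-length encode the (non-decreasing) sentence ids: one (sid, size) per group.
--     runs: list[tuple[int, int]] = []
--     for s in sids:
--         if runs and runs[-1][0] == s:
--             runs[-1] = (s, runs[-1][1] + 1)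
--         else:
--             runs.append((s, 1))
--
--     if len(runs) < 2:
--         return candidate_indices
--
--     best = min(runs, key=lambda run: abs(run[1] - target_replacements))[0]
--     return [i for i, s in zip(cands, sids) if s == best] + [
--         i for i, s in zip(cands, sids) if s != best
--     ]
-- ===== Notes on version B (the rewrite author's own statement) =====
-- stated objective: alternative
-- what changed: B never builds per-sentence lists of indices: it labels each candidate with a sentence id (count of '.'/'!'/'?' tokens before it), run-length encodes these ids to get group sizes, picks the best-sized sentence id with one min(), and partitions the candidates by that id, whereas A buffers candidates into group lists during a token scan and stable-sorts the group lists.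
import Mathlib
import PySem

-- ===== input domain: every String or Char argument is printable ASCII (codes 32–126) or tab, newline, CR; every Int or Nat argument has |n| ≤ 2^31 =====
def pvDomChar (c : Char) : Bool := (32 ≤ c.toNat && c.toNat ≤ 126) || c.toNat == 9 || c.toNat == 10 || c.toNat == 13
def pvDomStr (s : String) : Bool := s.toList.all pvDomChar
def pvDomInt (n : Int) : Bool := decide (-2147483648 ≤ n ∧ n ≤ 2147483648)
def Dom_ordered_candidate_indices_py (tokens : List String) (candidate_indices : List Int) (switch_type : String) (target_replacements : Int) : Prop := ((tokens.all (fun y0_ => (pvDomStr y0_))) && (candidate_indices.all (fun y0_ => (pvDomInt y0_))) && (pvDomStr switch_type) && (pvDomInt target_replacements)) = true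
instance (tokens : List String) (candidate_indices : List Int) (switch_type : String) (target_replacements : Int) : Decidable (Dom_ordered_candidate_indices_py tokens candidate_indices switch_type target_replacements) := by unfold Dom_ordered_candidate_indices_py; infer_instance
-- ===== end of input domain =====

-- B never builds per-sentence index lists: it labels each candidate with a sentence id
-- (number of '.'/'!'/'?' tokens before it), run-length encodes the ids into (id, size)
-- runs, picks the best-sized id with one min(), and partitions the candidates by that id
-- (objective: alternative). Python's identity test `group is ranked_groups[0]` in A is
-- ported as value equality: exact here, because the groups hold pairwise-disjoint token
-- indices, so no two distinct groups are ever equal as values.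

-- token is a sentence boundary: Python's `token in {".", "!", "?"}`
def pvBdry (t : String) : Bool := t == "." || t == "!" || t == "?"

-- ===== PORT A =====
-- step of the loop in _sentence_candidate_groups: state (groups, current)
def pvStepA (candSet : List Int) (st : List (List Int) × List Int) (p : Int × String) : List (List Int) × List Int :=
  let current := if p.1 ∈ candSet then st.2 ++ [p.1] else st.2
  if pvBdry p.2 then
    if current ≠ [] then (st.1 ++ [current], []) else (st.1, current)
  else (st.1, current)

def sentence_candidate_groups_py (tokens : List String) (candidate_indices : List Int) : List (List Int) :=
  let candSet := PySem.Set.ofList candidate_indices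
  let st := (PySem.List.enumerate tokens).foldl (pvStepA candSet) ([], [])
  if st.2 ≠ [] then st.1 ++ [st.2] else st.1

def ordered_candidate_indices_py (tokens : List String) (candidate_indices : List Int) (switch_type : String) (target_replacements : Int) : List Int :=
  if switch_type ≠ "inter-sentential" then candidate_indices
  else
    let sentence_groups := sentence_candidate_groups_py tokens candidate_indices
    if sentence_groups.length ≥ 2 then
      let ranked := PySem.List.sorted sentence_groups (fun group => |(group.length : Int) - target_replacements|)
      let g0 := ranked.headD []
      let ordered := g0.foldl (fun acc index => acc ++ [index]) []
      sentence_groups.foldl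
        (fun acc group => if group = g0 then acc else group.foldl (fun a index => a ++ [index]) acc)
        ordered
    else candidate_indices

-- ===== PORT B =====
-- one step of B's run-length-encoding loop over the sentence ids
def pvRunStep (runs : List (Int × Int)) (s : Int) : List (Int × Int) :=
  match runs.getLast? with
  | some r => if r.1 == s then runs.dropLast ++ [(s, r.2 + 1)] else runs ++ [(s, 1)]
  | none => runs ++ [(s, 1)]

def ordered_candidate_indices_py_alt (tokens : List String) (candidate_indices : List Int) (switch_type : String) (target_replacements : Int) : List Int :=
  if switch_type ≠ "inter-sentential" then candidate_indices
  else
    -- sorted({i for i in candidate_indices if 0 <= i < len(tokens)})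
    let cands := PySem.List.sorted
      (PySem.Set.ofList (candidate_indices.filter (fun i => decide (0 ≤ i) && decide (i < (tokens.length : Int)))))
      (fun i => i)
    -- sum(1 for t in tokens[:i] if t in (".","!","?")) ported as count = (filter …).length
    let sids := cands.map (fun i => (((PySem.List.slice tokens none (some i)).filter pvBdry).length : Int))
    let runs := sids.foldl pvRunStep []
    if runs.length < 2 then candidate_indices
    else
      -- min() of a nonempty list: the `.getD (0,0)` default is never used (runs.length ≥ 2)
      let best := ((PySem.List.min? runs (fun run => |run.2 - target_replacements|)).getD (0, 0)).1
      ((cands.zip sids).filter (fun p => p.2 == best)).map (·.1) ++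
        ((cands.zip sids).filter (fun p => p.2 != best)).map (·.1)

-- ===== PRECONDITION & SPEC =====
def Spec_ordered_candidate_indices_py (tokens : List String) (candidate_indices : List Int) (switch_type : String) (target_replacements : Int) (out : List Int) : Prop := out = ordered_candidate_indices_py_alt tokens candidate_indices switch_type target_replacements
instance (tokens : List String) (candidate_indices : List Int) (switch_type : String) (target_replacements : Int) (out : List Int) : Decidable (Spec_ordered_candidate_indices_py tokens candidate_indices switch_type target_replacements out) := by unfold Spec_ordered_candidate_indices_py; infer_instance

-- ===== CLAIM (what is proved, stated in full; the proofs are below) =====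
def Claim_equal_ordered_candidate_indices_py : Prop := ∀ (tokens : List String) (candidate_indices : List Int) (switch_type : String) (target_replacements : Int), Dom_ordered_candidate_indices_py tokens candidate_indices switch_type target_replacements → Spec_ordered_candidate_indices_py tokens candidate_indices switch_type target_replacements (ordered_candidate_indices_py tokens candidate_indices switch_type target_replacements)

-- ===== LEMMAS AND PROOFS =====

-- closing a 'current' buffer: what A's flush adds to the finished groups
def pvClose (cur : List Int) : List (List Int) := if cur ≠ [] then [cur] else []

-- A's token scan, as structural recursion over the token suffix starting at position k,
-- returning the fully flushed list of groups
def pvFull (cs : List Int) : List String → Nat → List Int → List (List Int)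
  | [], _, cur => pvClose cur
  | t :: ts, k, cur =>
      let cur' := if (k : Int) ∈ cs then cur ++ [(k : Int)] else cur
      if pvBdry t then pvClose cur' ++ pvFull cs ts (k + 1) []
      else pvFull cs ts (k + 1) cur'

-- sentence segments of candidate positions (possibly empty), as (first segment, rest)
def pvSegP (cs : List Int) : List String → Nat → List Int × List (List Int)
  | [], _ => ([], [])
  | t :: ts, k =>
      let p := pvSegP cs ts (k + 1)
      let e := if (k : Int) ∈ cs then [(k : Int)] else []
      if pvBdry t then (e, p.1 :: p.2) else (e ++ p.1, p.2)

def pvSegs (cs : List Int) (ts : List String) (k : Nat) : List (List Int) :=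
  (pvSegP cs ts k).1 :: (pvSegP cs ts k).2

-- the candidate positions in [k, k+|ts|) in increasing order
def pvCandsR (cs : List Int) : List String → Nat → List Int
  | [], _ => []
  | _ :: ts, k => (if (k : Int) ∈ cs then [(k : Int)] else []) ++ pvCandsR cs ts (k + 1)

-- sentence id of position i relative to the token suffix ts at absolute position k
def pvSid (ts : List String) (k : Nat) (i : Int) : Int :=
  (((ts.take (i.toNat - k)).filter pvBdry).length : Int)

def pvBC (ts : List String) : Nat := (ts.filter pvBdry).length

-- segment j of the suffix, described by sentence ids
def pvF (cs : List Int) (ts : List String) (k : Nat) (j : Nat) : List Int :=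
  (pvCandsR cs ts k).filter (fun i => pvSid ts k i == (j : Int))

def pvTag (len : Nat → Nat) (j : Nat) : Int × Int := ((j : Int), (len j : Int))

lemma pvFoldA (cs : List Int) (ts : List String) : ∀ (k : Nat) (G : List (List Int)) (cur : List Int),
    ((PySem.List.enumerate ts (k : Int)).foldl (pvStepA cs) (G, cur)).1 ++
      pvClose ((PySem.List.enumerate ts (k : Int)).foldl (pvStepA cs) (G, cur)).2 =
      G ++ pvFull cs ts k cur := by
  induction ts with
  | nil => intro k G cur; simp [PySem.List.enumerate_nil, pvFull]
  | cons t ts ih =>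
    intro k G cur
    rw [PySem.List.enumerate_cons]
    have hc : (k : Int) + 1 = ((k + 1 : Nat) : Int) := by push_cast; ring
    simp only [List.foldl_cons, hc, pvFull]
    by_cases hb : pvBdry t
    · by_cases hcur : (if (k : Int) ∈ cs then cur ++ [(k : Int)] else cur) ≠ []
      · have : pvStepA cs (G, cur) ((k : Int), t) = (G ++ [if (k : Int) ∈ cs then cur ++ [(k : Int)] else cur], []) := by
          simp [pvStepA, hb, hcur]
        rw [this, ih]
        simp [pvClose, hb, hcur]
      · push_neg at hcur
        have : pvStepA cs (G, cur) ((k : Int), t) = (G, (if (k : Int) ∈ cs then cur ++ [(k : Int)] else cur)) := by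
          simp [pvStepA, hb, hcur]
        rw [this, ih]
        simp [pvClose, hb, hcur]
    · have : pvStepA cs (G, cur) ((k : Int), t) = (G, (if (k : Int) ∈ cs then cur ++ [(k : Int)] else cur)) := by
        simp [pvStepA, hb]
      rw [this, ih]
      simp [hb]

lemma pvFull_segs (cs : List Int) (ts : List String) : ∀ (k : Nat) (cur : List Int),
    pvFull cs ts k cur =
      ((cur ++ (pvSegP cs ts k).1) :: (pvSegP cs ts k).2).filter (fun g => !g.isEmpty) := by
  induction ts with
  | nil =>
    intro k cur
    simp only [pvFull, pvSegP, pvClose, List.append_nil, List.filter]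
    rcases cur with _ | ⟨c, cur⟩ <;> simp
  | cons t ts ih =>
    intro k cur
    simp only [pvFull, pvSegP]
    by_cases hb : pvBdry t
    · simp only [hb, if_true]
      rw [ih (k+1) []]
      by_cases hm : (k : Int) ∈ cs
      · simp only [hm, if_true]
        have h1 : pvClose (cur ++ [(k : Int)]) = [cur ++ [(k : Int)]] := by simp [pvClose]
        rw [h1]
        simp [List.filter_cons]
      · simp only [hm, if_false]
        rcases cur with _ | ⟨c, cur⟩ <;> simp [pvClose, List.filter_cons]
    · simp only [hb, if_false, Bool.false_eq_true]
      rw [ih (k+1) _]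
      by_cases hm : (k : Int) ∈ cs <;> simp [hm]

lemma pvSegs_flatten (cs : List Int) (ts : List String) : ∀ (k : Nat),
    (pvSegs cs ts k).flatten = pvCandsR cs ts k := by
  induction ts with
  | nil => intro k; simp [pvSegs, pvSegP, pvCandsR]
  | cons t ts ih =>
    intro k
    have h2 : (pvSegP cs ts (k+1)).1 ++ (pvSegP cs ts (k+1)).2.flatten = pvCandsR cs ts (k+1) := by
      have := ih (k+1)
      simpa [pvSegs] using this
    by_cases hb : pvBdry t
    · have h : pvSegs cs (t :: ts) k = (if (k : Int) ∈ cs then [(k:Int)] else []) :: pvSegs cs ts (k+1) := by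
        simp [pvSegs, pvSegP, hb]
      rw [h, List.flatten_cons, ih (k+1)]
      rfl
    · have h : pvSegs cs (t :: ts) k = ((if (k : Int) ∈ cs then [(k:Int)] else []) ++ (pvSegP cs ts (k+1)).1) :: (pvSegP cs ts (k+1)).2 := by
        simp [pvSegs, pvSegP, hb]
      rw [h, List.flatten_cons, List.append_assoc, h2]
      rfl

lemma pvMem_candsR (cs : List Int) (ts : List String) : ∀ (k : Nat) (i : Int),
    i ∈ pvCandsR cs ts k ↔ i ∈ cs ∧ (k : Int) ≤ i ∧ i < (k : Int) + ts.length := by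
  induction ts with
  | nil => intro k i; simp [pvCandsR]
  | cons t ts ih =>
    intro k i
    simp only [pvCandsR, List.mem_append, ih (k+1), List.length_cons]
    by_cases hm : (k : Int) ∈ cs
    · simp only [hm, if_true, List.mem_singleton]
      constructor
      · rintro (rfl | ⟨h1, h2, h3⟩)
        · refine ⟨hm, by omega, ?_⟩
          push_cast; omega
        · refine ⟨h1, ?_, ?_⟩ <;> push_cast at h2 h3 ⊢ <;> omega
      · rintro ⟨h1, h2, h3⟩
        by_cases he : i = (k : Int)
        · exact Or.inl he
        · refine Or.inr ⟨h1, ?_, ?_⟩ <;> push_cast at h2 h3 ⊢ <;> omega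
    · simp only [hm, if_false, List.not_mem_nil, false_or]
      constructor
      · rintro ⟨h1, h2, h3⟩
        refine ⟨h1, ?_, ?_⟩ <;> push_cast at h2 h3 ⊢ <;> omega
      · rintro ⟨h1, h2, h3⟩
        have hne : i ≠ (k : Int) := by rintro rfl; exact hm h1
        refine ⟨h1, ?_, ?_⟩ <;> push_cast at h2 h3 ⊢ <;> omega

lemma pvPairwise_candsR (cs : List Int) (ts : List String) : ∀ (k : Nat),
    (pvCandsR cs ts k).Pairwise (· < ·) := by
  induction ts with
  | nil => intro k; simp [pvCandsR]
  | cons t ts ih =>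
    intro k
    simp only [pvCandsR]
    rw [List.pairwise_append]
    refine ⟨?_, ih (k+1), ?_⟩
    · by_cases hm : (k : Int) ∈ cs <;> simp [hm]
    · intro a ha b hb
      have hb' := (pvMem_candsR cs ts (k+1) b).mp hb
      have ha' : a = (k : Int) := by
        by_cases hm : (k : Int) ∈ cs <;> simp [hm] at ha
        exact ha
      subst ha'
      have h2 := hb'.2.1
      push_cast at h2
      omega

lemma pvSid_lift (t : String) (ts : List String) (k : Nat) (i : Int) (hi : (k : Int) + 1 ≤ i) :
    pvSid (t :: ts) k i = (if pvBdry t then 1 else 0) + pvSid ts (k + 1) i := by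
  have h1 : i.toNat - k = (i.toNat - (k + 1)) + 1 := by omega
  unfold pvSid
  rw [h1, List.take_succ_cons, List.filter_cons]
  by_cases hb : pvBdry t <;> simp [hb] <;> push_cast <;> ring

lemma pvSid_self (t : String) (ts : List String) (k : Nat) :
    pvSid (t :: ts) k (k : Int) = 0 := by
  unfold pvSid
  simp

lemma pvSid_nonneg (ts : List String) (k : Nat) (i : Int) : 0 ≤ pvSid ts k i := by
  unfold pvSid; positivity

lemma pvF_zero (cs : List Int) (t : String) (ts : List String) (k : Nat) :
    pvF cs (t :: ts) k 0 =
      (if (k : Int) ∈ cs then [(k : Int)] else []) ++ (if pvBdry t then [] else pvF cs ts (k+1) 0) := by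
  unfold pvF
  rw [show pvCandsR cs (t :: ts) k = (if (k : Int) ∈ cs then [(k : Int)] else []) ++ pvCandsR cs ts (k+1) from rfl,
    List.filter_append]
  congr 1
  · by_cases hm : (k : Int) ∈ cs <;> simp [hm, pvSid_self]
  · by_cases hb : pvBdry t
    · simp only [hb, if_true]
      rw [List.filter_eq_nil_iff]
      intro i hi
      have hki := ((pvMem_candsR cs ts (k+1) i).mp hi).2.1
      rw [pvSid_lift t ts k i (by push_cast at hki ⊢; omega)]
      have h0 := pvSid_nonneg ts (k+1) i
      simp only [hb, if_true, beq_iff_eq, Nat.cast_zero, Nat.cast_ofNat]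
      omega
    · simp only [hb, Bool.false_eq_true, if_false]
      apply List.filter_congr
      intro i hi
      have hki := ((pvMem_candsR cs ts (k+1) i).mp hi).2.1
      rw [pvSid_lift t ts k i (by push_cast at hki ⊢; omega)]
      simp [hb]

lemma pvF_succ (cs : List Int) (t : String) (ts : List String) (k : Nat) (j : Nat) :
    pvF cs (t :: ts) k (j+1) = if pvBdry t then pvF cs ts (k+1) j else pvF cs ts (k+1) (j+1) := by
  unfold pvF
  rw [show pvCandsR cs (t :: ts) k = (if (k : Int) ∈ cs then [(k : Int)] else []) ++ pvCandsR cs ts (k+1) from rfl,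
    List.filter_append]
  have he : ((if (k : Int) ∈ cs then [(k : Int)] else []).filter (fun i => pvSid (t :: ts) k i == ((j+1 : Nat) : Int))) = [] := by
    by_cases hm : (k : Int) ∈ cs <;> simp [hm, pvSid_self]
    push_cast
    omega
  rw [he, List.nil_append]
  by_cases hb : pvBdry t
  · simp only [hb, if_true]
    apply List.filter_congr
    intro i hi
    have hki := ((pvMem_candsR cs ts (k+1) i).mp hi).2.1
    rw [pvSid_lift t ts k i (by push_cast at hki ⊢; omega)]
    simp only [hb, if_true]
    rw [Bool.eq_iff_iff]
    simp only [beq_iff_eq]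
    push_cast
    omega
  · simp only [hb, Bool.false_eq_true, if_false]
    apply List.filter_congr
    intro i hi
    have hki := ((pvMem_candsR cs ts (k+1) i).mp hi).2.1
    rw [pvSid_lift t ts k i (by push_cast at hki ⊢; omega)]
    simp [hb]

lemma pvMEQ (cs : List Int) (ts : List String) : ∀ (k : Nat),
    pvSegs cs ts k = (List.range (pvBC ts + 1)).map (pvF cs ts k) := by
  induction ts with
  | nil =>
    intro k
    simp [pvSegs, pvSegP, pvBC, pvF, pvCandsR]
  | cons t ts ih =>
    intro k
    by_cases hb : pvBdry t
    · have hsegs : pvSegs cs (t :: ts) k = (if (k : Int) ∈ cs then [(k : Int)] else []) :: pvSegs cs ts (k+1) := by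
        simp [pvSegs, pvSegP, hb]
      have hbc : pvBC (t :: ts) = pvBC ts + 1 := by simp [pvBC, List.filter_cons, hb]
      rw [hsegs, hbc]
      conv_rhs => rw [List.range_succ_eq_map, List.map_cons, List.map_map]
      congr 1
      · rw [pvF_zero]; simp [hb]
      · rw [ih (k+1)]
        apply List.map_congr_left
        intro j hj
        simp only [Function.comp_apply]
        rw [pvF_succ]
        simp [hb]
    · have hsegs : pvSegs cs (t :: ts) k =
          ((if (k : Int) ∈ cs then [(k : Int)] else []) ++ (pvSegP cs ts (k+1)).1) :: (pvSegP cs ts (k+1)).2 := by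
        simp [pvSegs, pvSegP, hb]
      have hbc : pvBC (t :: ts) = pvBC ts := by simp [pvBC, List.filter_cons, hb]
      have hih := ih (k+1)
      rw [show pvSegs cs ts (k+1) = (pvSegP cs ts (k+1)).1 :: (pvSegP cs ts (k+1)).2 from rfl,
        List.range_succ_eq_map, List.map_cons, List.map_map] at hih
      obtain ⟨hp1, hp2⟩ := List.cons_eq_cons.mp hih
      rw [hsegs, hbc]
      conv_rhs => rw [List.range_succ_eq_map, List.map_cons, List.map_map]
      congr 1
      · rw [pvF_zero, hp1]; simp [hb]
      · rw [hp2]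
        apply List.map_congr_left
        intro j hj
        simp only [Function.comp_apply]
        rw [pvF_succ]
        simp [hb]

lemma pvMin?_map {α β : Type} (f : α → β) (key : β → Int) (l : List α) :
    PySem.List.min? (l.map f) key = (PySem.List.min? l (fun x => key (f x))).map f := by
  unfold PySem.List.min?
  suffices h : ∀ (acc : Option α),
      (l.map f).foldl (fun acc x => match acc with
        | none => some x
        | some m => if key x < key m then some x else some m) (acc.map f) =
      (l.foldl (fun acc x => match acc with
        | none => some x
        | some m => if key (f x) < key (f m) then some x else some m) acc).map f by
    simpa using h none
  induction l with
  | nil => intro acc; rfl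
  | cons a l ih =>
    intro acc
    rcases acc with _ | m
    · simpa using ih (some a)
    · simp only [List.map_cons, List.foldl_cons, Option.map_some]
      by_cases h : key (f a) < key (f m)
      · simpa [h] using ih (some a)
      · simpa [h] using ih (some m)

lemma pvRun_absorb2 (s : Int) (acc : List (Int × Int)) : ∀ (c : Nat) (m : Int),
    (List.replicate c s).foldl pvRunStep (acc ++ [(s, m)]) = acc ++ [(s, m + c)] := by
  intro c
  induction c with
  | zero => intro m; simp
  | succ c ih =>
    intro m
    rw [List.replicate_succ, List.foldl_cons]
    have h1 : pvRunStep (acc ++ [(s, m)]) s = acc ++ [(s, m + 1)] := by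
      simp [pvRunStep, List.getLast?_concat, List.dropLast_concat]
    rw [h1, ih (m+1)]
    have hc : m + 1 + (c : Int) = m + ((c+1 : Nat) : Int) := by push_cast; ring
    rw [hc]

lemma pvRun_block2 (s : Int) (acc : List (Int × Int)) (c : Nat) (hc : 0 < c)
    (hl : ∀ q, acc.getLast? = some q → q.1 ≠ s) :
    (List.replicate c s).foldl pvRunStep acc = acc ++ [(s, (c : Int))] := by
  rcases c with _ | c
  · omega
  rw [List.replicate_succ, List.foldl_cons]
  have h1 : pvRunStep acc s = acc ++ [(s, 1)] := by
    unfold pvRunStep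
    rcases h : acc.getLast? with _ | q
    · rfl
    · have hq := hl q h
      simp [hq]
  rw [h1, pvRun_absorb2]
  have hc : (1 : Int) + (c : Int) = ((c+1 : Nat) : Int) := by push_cast; ring
  rw [hc]

lemma pvRun_flatten2 (len : Nat → Nat) : ∀ (occ : List Nat) (acc : List (Int × Int)),
    occ.Pairwise (· < ·) → (∀ j ∈ occ, 0 < len j) →
    (∀ q, acc.getLast? = some q → ∀ j ∈ occ, q.1 ≠ (j : Int)) →
    (occ.map (fun j => List.replicate (len j) ((j : Int)))).flatten.foldl pvRunStep acc =
      acc ++ occ.map (pvTag len) := by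
  intro occ
  induction occ with
  | nil => intro acc _ _ _; simp
  | cons j occ ih =>
    intro acc hp hl hacc
    rw [List.map_cons, List.flatten_cons, List.foldl_append]
    rw [pvRun_block2 (j : Int) acc (len j) (hl j (by simp)) (fun q hq => hacc q hq j (by simp))]
    rw [ih (acc ++ [((j : Int), (len j : Int))]) hp.of_cons (fun x hx => hl x (by simp [hx])) ?_]
    · simp [pvTag]
    · intro q hq j' hj'
      rw [List.getLast?_concat] at hq
      injection hq with hq
      subst hq
      have hlt := (List.pairwise_cons.mp hp).1 j' hj'
      simp only [ne_eq, Int.natCast_inj]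
      omega

lemma pvFilter_map {α β : Type} (f : α → β) (q : β → Bool) (l : List α) :
    (l.map f).filter q = (l.filter (fun x => q (f x))).map f := by
  induction l with
  | nil => rfl
  | cons a l ih => simp [List.filter_cons]; split <;> simp_all

lemma pvFlatten_map_filter {α : Type} (q : α → Bool) (f : α → List Int) (l : List α) :
    ((l.filter q).map f).flatten = (l.map (fun j => if q j then f j else [])).flatten := by
  induction l with
  | nil => rfl
  | cons a l ih => by_cases h : q a <;> simp [List.filter_cons, h, ih]

-- the head of Python's stable sort is the FIRST minimal element, i.e. Python's min()
lemma head?_foldl_insertBy {α : Type} (key : α → Int) (l : List α) :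
    ∀ (acc : List α),
      (l.foldl (fun acc x => PySem.List.insertBy (fun a b => decide (key a < key b)) x acc) acc).head? =
        l.foldl (fun m x => match m with
          | none => some x
          | some m => if key x < key m then some x else some m) acc.head? := by
  induction l with
  | nil => intro acc; rfl
  | cons x l ih =>
    intro acc
    simp only [List.foldl_cons]
    rw [ih]
    rcases acc with _ | ⟨a, as⟩
    · simp [PySem.List.insertBy]
    · simp [PySem.List.insertBy]
      split <;> simp

lemma head?_sorted_eq_min? {α : Type} (xs : List α) (key : α → Int) :
    (PySem.List.sorted xs key).head? = PySem.List.min? xs key := by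
  rw [PySem.List.sorted_eq_foldl_insertBy]
  simpa using head?_foldl_insertBy key xs []

-- A's append-one-by-one inner loop extends the accumulator with the group
lemma inner_loop_eq (g : List Int) (acc : List Int) :
    g.foldl (fun a index => a ++ [index]) acc = acc ++ g :=
  PySem.List.foldl_append_singleton_eq_self g acc

-- A's skip loop is a filter-and-flatten
lemma skip_loop_eq (g0 : List Int) (l : List (List Int)) (acc : List Int) :
    l.foldl (fun acc group => if group = g0 then acc else group.foldl (fun a index => a ++ [index]) acc) acc =
      acc ++ (l.filter (fun group => group ≠ g0)).flatten := by
  induction l generalizing acc with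
  | nil => simp
  | cons g l ih =>
    simp only [List.foldl_cons]
    by_cases h : g = g0
    · rw [if_pos h, ih]; simp [h]
    · rw [if_neg h, inner_loop_eq, ih]; simp [h]

lemma pvGroups_eq (tokens : List String) (cis : List Int) :
    sentence_candidate_groups_py tokens cis = pvFull (PySem.Set.ofList cis) tokens 0 [] := by
  unfold sentence_candidate_groups_py
  have h := pvFoldA (PySem.Set.ofList cis) tokens 0 [] []
  simp only [List.nil_append, Nat.cast_zero] at h
  rw [← h]
  dsimp only
  by_cases hc : (List.foldl (pvStepA (PySem.Set.ofList cis)) ([], []) (PySem.List.enumerate tokens)).2 = [] <;>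
    simp [pvClose, hc]

-- ===== VERDICT (by name: the statement is the Claim_ definition above) =====
theorem ordered_candidate_indices_py_spec : Claim_equal_ordered_candidate_indices_py := by
  intro tokens cis st target _
  unfold Spec_ordered_candidate_indices_py ordered_candidate_indices_py ordered_candidate_indices_py_alt
  by_cases hs : st = "inter-sentential"
  case neg => simp [hs]
  simp only [hs, ne_eq, not_true_eq_false, if_false]
  -- A's groups, described by sentence ids
  have hgro0 := pvGroups_eq tokens cis
  rw [pvFull_segs (PySem.Set.ofList cis) tokens 0 [], List.nil_append] at hgro0
  rw [show ((pvSegP (PySem.Set.ofList cis) tokens 0).1 :: (pvSegP (PySem.Set.ofList cis) tokens 0).2)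
        = pvSegs (PySem.Set.ofList cis) tokens 0 from rfl,
      pvMEQ (PySem.Set.ofList cis) tokens 0] at hgro0
  set cs := PySem.Set.ofList cis with hcsdef
  set F := pvF cs tokens 0 with hFdef
  set occ := (List.range (pvBC tokens + 1)).filter (fun j => !(F j).isEmpty) with hoccdef
  have hgro : sentence_candidate_groups_py tokens cis = occ.map F := by
    rw [hgro0, hoccdef, pvFilter_map]
  -- B's candidate list is the increasing position list
  have hmemC : ∀ x : Int, x ∈ pvCandsR cs tokens 0 ↔
      x ∈ PySem.Set.ofList (cis.filter (fun i => decide (0 ≤ i) && decide (i < (tokens.length : Int)))) := by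
    intro x
    rw [pvMem_candsR, hcsdef, PySem.Set.mem_ofList, PySem.Set.mem_ofList, List.mem_filter]
    simp only [decide_eq_true_eq, Bool.and_eq_true, Nat.cast_zero, zero_add]
  have hnodC : (pvCandsR cs tokens 0).Nodup :=
    (pvPairwise_candsR cs tokens 0).imp (fun h => ne_of_lt h)
  have hcands : PySem.List.sorted
      (PySem.Set.ofList (cis.filter (fun i => decide (0 ≤ i) && decide (i < (tokens.length : Int)))))
      (fun i => i) = pvCandsR cs tokens 0 := by
    apply PySem.List.sorted_eq_of_perm_of_pairwise_lt
    · exact (List.perm_ext_iff_of_nodup hnodC (PySem.Set.nodup_ofList _)).mpr hmemC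
    · exact pvPairwise_candsR cs tokens 0
  -- B's sentence ids: slice-count equals pvSid
  have hsid : (pvCandsR cs tokens 0).map (fun i => (((PySem.List.slice tokens none (some i)).filter pvBdry).length : Int))
      = (pvCandsR cs tokens 0).map (pvSid tokens 0) := by
    apply List.map_congr_left
    intro i hi
    have h0 : (0 : Int) ≤ i := by
      have := ((pvMem_candsR cs tokens 0 i).mp hi).2.1
      simpa using this
    rw [PySem.List.slice_to tokens h0]
    unfold pvSid
    simp
  -- candidates are the segments flattened
  have hflat : pvCandsR cs tokens 0 = ((List.range (pvBC tokens + 1)).map F).flatten := by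
    rw [← pvSegs_flatten cs tokens 0, pvMEQ cs tokens 0]
  have hflat2 : pvCandsR cs tokens 0 = (occ.map F).flatten := by
    rw [hflat, ← List.flatten_filter_not_isEmpty (L := (List.range (pvBC tokens + 1)).map F), pvFilter_map]
  -- each segment has constant sentence id
  have hsidF : ∀ (j : Nat), ∀ i ∈ F j, pvSid tokens 0 i = (j : Int) := by
    intro j i hi
    have := (List.mem_filter.mp hi).2
    simpa [beq_iff_eq] using this
  have hrep : ∀ (j : Nat), (F j).map (pvSid tokens 0) = List.replicate (F j).length ((j : Int)) := by
    intro j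
    rw [List.eq_replicate_iff]
    refine ⟨by simp, ?_⟩
    intro b hb
    rcases List.mem_map.mp hb with ⟨i, hi, rfl⟩
    exact hsidF j i hi
  -- the sentence-id list is a flattening of constant blocks
  have hsids2 : (pvCandsR cs tokens 0).map (pvSid tokens 0)
      = (occ.map (fun j => List.replicate ((F j).length) ((j : Int)))).flatten := by
    rw [hflat2, List.map_flatten, List.map_map]
    congr 1
    apply List.map_congr_left
    intro j _
    exact hrep j
  have hOccPair : occ.Pairwise (· < ·) := List.Pairwise.filter _ List.pairwise_lt_range
  have hlenpos : ∀ j ∈ occ, 0 < (F j).length := by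
    intro j hj
    have h2 := (List.mem_filter.mp hj).2
    rcases hFj : F j with _ | ⟨a, l⟩
    · rw [hFj] at h2; simp at h2
    · simp
  -- the run-length encoding of the id list
  have hruns : ((pvCandsR cs tokens 0).map (pvSid tokens 0)).foldl pvRunStep []
      = occ.map (pvTag (fun j => (F j).length)) := by
    rw [hsids2]
    exact pvRun_flatten2 _ occ [] hOccPair hlenpos (by intro q hq; simp at hq)
  -- rewrite both sides into the occ/F form
  rw [hgro, hcands, hsid, hruns]
  rw [List.length_map, List.length_map]
  by_cases hlen : 2 ≤ occ.length
  case neg =>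
    have h1 : ¬ occ.length ≥ 2 := hlen
    have h2 : occ.length < 2 := by omega
    simp [h1, h2]
  have h1 : occ.length ≥ 2 := hlen
  have h2 : ¬ occ.length < 2 := by omega
  simp only [h1, if_true, h2, if_false, ge_iff_le, le_refl]
  -- the common first-minimal sentence id
  have hocc_ne : occ ≠ [] := by
    intro h; rw [h] at hlen; simp at hlen
  obtain ⟨jm, hmin⟩ : ∃ jm, PySem.List.min? occ (fun j => |((F j).length : Int) - target|) = some jm := by
    rcases h : PySem.List.min? occ (fun j => |((F j).length : Int) - target|) with _ | jm
    · exact absurd ((PySem.List.min?_eq_none_iff occ _).mp h) hocc_ne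
    · exact ⟨jm, rfl⟩
  have hjm_mem : jm ∈ occ := PySem.List.min?_mem hmin
  have hjm_lt : jm < pvBC tokens + 1 := List.mem_range.mp (List.mem_filter.mp hjm_mem).1
  -- A's ranked_groups[0] is F jm
  have hminA : PySem.List.min? (occ.map F) (fun group => |(group.length : Int) - target|) = some (F jm) := by
    rw [pvMin?_map F (fun group => |(group.length : Int) - target|) occ, hmin]
    rfl
  have hg0 : (PySem.List.sorted (occ.map F) (fun group => |(group.length : Int) - target|)).headD [] = F jm := by
    have hh := head?_sorted_eq_min? (occ.map F) (fun group => |(group.length : Int) - target|)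
    rw [hminA] at hh
    rcases hsort : PySem.List.sorted (occ.map F) (fun group => |(group.length : Int) - target|) with _ | ⟨a, as⟩
    · rw [hsort] at hh; simp at hh
    · rw [hsort] at hh; simp at hh; simp [hh]
  -- B's best is the id jm
  have hminB : PySem.List.min? (occ.map (pvTag (fun j => (F j).length))) (fun run => |run.2 - target|)
      = some (pvTag (fun j => (F j).length) jm) := by
    rw [pvMin?_map (pvTag (fun j => (F j).length)) (fun run => |run.2 - target|) occ]
    have hkey : (fun x => |(pvTag (fun j => (F j).length) x).2 - target|)
        = (fun j => |((F j).length : Int) - target|) := rfl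
    rw [hkey, hmin]
    rfl
  rw [hg0, hminB]
  simp only [Option.getD_some]
  rw [show (pvTag (fun j => (F j).length) jm).1 = ((jm : Nat) : Int) from rfl]
  -- A's loops: first the best group, then the others flattened
  rw [inner_loop_eq, List.nil_append, skip_loop_eq]
  -- B's comprehensions: partition the candidates by sentence id
  simp only [← List.map_prod_left_eq_zip, pvFilter_map, List.map_map]
  have hproj : ((fun p : Int × Int => p.1) ∘ (fun x => (x, pvSid tokens 0 x))) = id := rfl
  rw [hproj, List.map_id, List.map_id]
  -- head part: candidates with id jm are exactly F jm
  have hE1 : (pvCandsR cs tokens 0).filter (fun x => (pvSid tokens 0 x == (jm : Int))) = F jm := rfl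
  -- tail part: the remaining groups flattened are the candidates with other ids
  have hblock : ∀ j : Nat, (F j).filter (fun i => pvSid tokens 0 i != ((jm : Nat) : Int))
      = if j = jm then [] else F j := by
    intro j
    by_cases hj : j = jm
    · subst hj
      rw [if_pos rfl, List.filter_eq_nil_iff]
      intro i hi
      simp [hsidF j i hi]
    · rw [if_neg hj]
      apply List.filter_eq_self.mpr
      intro i hi
      have := hsidF j i hi
      simp only [this, bne_iff_ne, ne_eq, Int.natCast_inj]
      omega
  have hFinj : ∀ j ∈ occ, (decide (F j ≠ F jm)) = (decide (j ≠ jm)) := by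
    intro j hj
    by_cases hjq : j = jm
    · simp [hjq]
    · have hne : F j ≠ F jm := by
        intro he
        have hpos := hlenpos j hj
        rcases hFj : F j with _ | ⟨i, l⟩
        · rw [hFj] at hpos; simp at hpos
        · have hi : i ∈ F j := by rw [hFj]; simp
          have hv1 := hsidF j i hi
          have hv2 := hsidF jm i (by rw [← he]; exact hi)
          rw [hv1] at hv2
          exact hjq (by exact_mod_cast hv2)
      simp [hne, hjq]
  have hE2 : (List.map F (occ.filter (fun x => decide (F x ≠ F jm)))).flatten
      = (pvCandsR cs tokens 0).filter (fun x => pvSid tokens 0 x != ((jm : Nat) : Int)) := by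
    rw [List.filter_congr hFinj, hoccdef, List.filter_filter, pvFlatten_map_filter]
    rw [hflat, List.filter_flatten, List.map_map]
    congr 1
    apply List.map_congr_left
    intro j _
    simp only [Function.comp_apply]
    rw [hblock j]
    by_cases hj : j = jm
    · subst hj; simp
    · rcases hFj : F j with _ | ⟨a, l⟩ <;> simp [hj, hFj]
  rw [hE2, hE1]
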